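-- pv_equiv track=rewrite | github.com/posl/comment_recommendation | script/split_gen/2_time/en/211_C/7.py | solve
-- ===== SOURCE A (Python) =====
-- def solve(s):
--     from collections import defaultdict
--     d = defaultdict(int)
--     for c in s:
--         d[c] += 1
--     for c in 'chokudai':
--         if c not in d:
--             return 0
--     d = list(d.values())
--     d.sort()
--     a = d[0]
--     d = d[1:]
--     d = [i-a for i in d]
--     d = [i%1000000007 for i in d]
--     d = [i*(i+1)//2 for i in d]
--     d = [i%1000000007 for i in d]
--     d = [i*(i+1)//2 for i in d]
--     d = [i%1000000007 for i in d]
--     d = [i*(i+1)//2 for i in d]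
--     d = [i%1000000007 for i in d]
--     d = [i*(i+1)//2 for i in d]
--     d = [i%1000000007 for i in d]
--     return d[0]
-- ===== SOURCE B (Python) =====
-- M = 1000000007
--
-- def _tri(v, k):
--     # k rounds of v -> v*(v+1)//2 mod M, recursively
--     if k == 0:
--         return v
--     return _tri(v * (v + 1) // 2 % M, k - 1)
--
-- def solve(s):
--     freq = {}
--     for c in s:
--         freq[c] = freq.get(c, 0) + 1
--     for c in 'chokudai':
--         if c not in freq:
--             return 0
--     vals = list(freq.values())
--     # two smallest counts by a single linear scan -- no sorting
--     m1, m2 = vals[0], vals[1]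
--     if m2 < m1:
--         m1, m2 = m2, m1
--     for x in vals[2:]:
--         if x < m1:
--             m1, m2 = x, m1
--         elif x < m2:
--             m2 = x
--     return _tri((m2 - m1) % M, 4)
-- ===== Notes on version B (the rewrite author's own statement) =====
-- stated objective: alternative
-- what changed: B never sorts: it finds the two smallest character counts by a single linear min-pair scan over the dict values, and applies the triangular-number map four times by recursion on a scalar instead of A's nine unrolled whole-list comprehension passes over the sorted, shifted counts.
import Mathlib
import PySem

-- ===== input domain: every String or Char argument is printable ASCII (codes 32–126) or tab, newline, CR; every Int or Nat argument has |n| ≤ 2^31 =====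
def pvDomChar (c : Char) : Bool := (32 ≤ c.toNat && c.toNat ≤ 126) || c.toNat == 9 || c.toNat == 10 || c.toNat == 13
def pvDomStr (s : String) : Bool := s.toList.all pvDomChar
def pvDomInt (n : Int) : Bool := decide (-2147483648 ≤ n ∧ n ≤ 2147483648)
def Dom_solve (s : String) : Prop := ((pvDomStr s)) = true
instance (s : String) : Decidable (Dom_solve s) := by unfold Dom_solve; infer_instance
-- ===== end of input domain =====

-- B finds the two smallest counts by a linear min-pair scan (no sort) and applies the
-- triangular map four times recursively on a scalar instead of nine whole-list passes.

-- ===== PORT A =====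
def solve (s : String) : Int :=
  -- d = defaultdict(int); for c in s: d[c] += 1
  let d : PySem.Dict Char Int :=
    s.toList.foldl (fun d c => d.modify c 0 (· + 1)) PySem.Dict.empty
  -- for c in 'chokudai': if c not in d: return 0
  if "chokudai".toList.any (fun c => !(d.contains c)) then 0
  else
    -- d = list(d.values()); d.sort()
    let vals := PySem.List.sorted d.values (fun x => x) false
    -- a = d[0]  (IndexError impossible in Python: the 8 letters are present)
    match PySem.List.pyGet? vals 0 with
    | none => 0          -- unreachable
    | some a =>
      let t := PySem.List.slice vals (some 1) none          -- d = d[1:]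
      let t := t.map (fun i => i - a)
      let t := t.map (fun i => PySem.Int.mod i 1000000007)
      let t := t.map (fun i => PySem.Int.floordiv (i * (i + 1)) 2)
      let t := t.map (fun i => PySem.Int.mod i 1000000007)
      let t := t.map (fun i => PySem.Int.floordiv (i * (i + 1)) 2)
      let t := t.map (fun i => PySem.Int.mod i 1000000007)
      let t := t.map (fun i => PySem.Int.floordiv (i * (i + 1)) 2)
      let t := t.map (fun i => PySem.Int.mod i 1000000007)
      let t := t.map (fun i => PySem.Int.floordiv (i * (i + 1)) 2)
      let t := t.map (fun i => PySem.Int.mod i 1000000007)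
      -- return d[0]  (IndexError impossible in Python)
      (PySem.List.pyGet? t 0).getD 0

-- ===== PORT B =====
-- _tri(v, k): k rounds of v -> v*(v+1)//2 % M, recursively (B only calls it with k = 4)
def pvTri (v : Int) : Nat → Int
  | 0 => v
  | k + 1 => pvTri (PySem.Int.mod (PySem.Int.floordiv (v * (v + 1)) 2) 1000000007) k

-- one step of the min-pair scan: the loop body of B's for-loop
def pvStep (st : Int × Int) (x : Int) : Int × Int :=
  if x < st.1 then (x, st.1) else if x < st.2 then (st.1, x) else st

def solve_alt (s : String) : Int :=
  let freq : PySem.Dict Char Int :=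
    s.toList.foldl (fun d c => d.insert c (d.getD c 0 + 1)) PySem.Dict.empty
  if "chokudai".toList.any (fun c => !(freq.contains c)) then 0
  else
    match freq.values with
    | v0 :: v1 :: rest =>
      -- m1, m2 = vals[0], vals[1]; if m2 < m1: swap; then scan vals[2:]
      let p := rest.foldl pvStep (if v1 < v0 then (v1, v0) else (v0, v1))
      pvTri (PySem.Int.mod (p.2 - p.1) 1000000007) 4
    | _ => 0          -- unreachable in Python (the check guarantees ≥ 8 distinct keys)

-- ===== PRECONDITION & SPEC =====
def Spec_solve (s : String) (out : Int) : Prop := out = solve_alt s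
instance (s : String) (out : Int) : Decidable (Spec_solve s out) := by unfold Spec_solve; infer_instance

-- ===== CLAIM =====
def Claim_equal_solve : Prop := ∀ (s : String), Dom_solve s → Spec_solve s (solve s)

-- ===== LEMMAS AND PROOFS =====

-- the scan step is right-commutative (order of processed elements does not matter)
theorem pvStep_comm (st : Int × Int) (x y : Int) :
    pvStep (pvStep st x) y = pvStep (pvStep st y) x := by
  rcases st with ⟨a, b⟩
  simp only [pvStep]
  split_ifs <;> simp_all <;> omega

-- scanning elements that are all ≥ both components is a no-op
theorem pvScan_noop (t : List Int) (a b : Int) (hab : a ≤ b) (h : ∀ x ∈ t, b ≤ x) :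
    t.foldl pvStep (a, b) = (a, b) := by
  induction t with
  | nil => rfl
  | cons x t ih =>
    have hx : b ≤ x := h x (List.mem_cons_self)
    have hstep : pvStep (a, b) x = (a, b) := by
      simp only [pvStep]; split_ifs <;> first | rfl | omega
    simp only [List.foldl_cons, hstep]
    exact ih (fun y hy => h y (List.mem_cons_of_mem x hy))

-- the min-pair scan computes the first two elements of the sorted list
theorem pvScan_eq_sorted_head (v0 v1 : Int) (rest : List Int) (s0 s1 : Int) (t : List Int)
    (hs : PySem.List.sorted (v0 :: v1 :: rest) (fun x => x) false = s0 :: s1 :: t) :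
    rest.foldl pvStep (if v1 < v0 then (v1, v0) else (v0, v1)) = (s0, s1) := by
  haveI : RightCommutative pvStep := ⟨fun st x y => pvStep_comm st x y⟩
  set vals := v0 :: v1 :: rest with hvals
  have hperm : (PySem.List.sorted vals (fun x => x) false).Perm vals :=
    PySem.List.sorted_perm vals (fun x => x) false
  -- a sentinel strictly above every element of vals
  set M : Int := vals.foldl max v0 + 1 with hM
  have hbound : ∀ x ∈ vals, x < M := fun x hx => by
    have := (PySem.List.le_foldl_max vals v0).2 x hx
    omega
  -- folding the whole list from the sentinel pair equals B's scan
  have h0 : v0 < M := hbound v0 (by simp [hvals])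
  have h1 : v1 < M := hbound v1 (by simp [hvals])
  have hfull : vals.foldl pvStep (M, M) =
      rest.foldl pvStep (if v1 < v0 then (v1, v0) else (v0, v1)) := by
    have e0 : pvStep (M, M) v0 = (v0, M) := by
      simp only [pvStep]; split_ifs <;> first | rfl | omega
    have e1 : pvStep (v0, M) v1 = (if v1 < v0 then (v1, v0) else (v0, v1)) := by
      simp only [pvStep]; split_ifs <;> first | rfl | omega
    simp only [hvals, List.foldl_cons, e0, e1]
  -- folding the sorted list from the sentinel pair yields its first two elements
  have hpair : List.Pairwise (fun a b : Int => a ≤ b) (s0 :: s1 :: t) := by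
    have := PySem.List.sorted_pairwise vals (fun x => x)
    rw [hs] at this; exact this
  have h01 : s0 ≤ s1 := (List.pairwise_cons.mp hpair).1 s1 (by simp)
  have hts : ∀ x ∈ t, s1 ≤ x :=
    (List.pairwise_cons.mp (List.pairwise_cons.mp hpair).2).1
  have hs0 : s0 ∈ vals := hperm.mem_iff.mp (by rw [hs]; simp)
  have hs1 : s1 ∈ vals := hperm.mem_iff.mp (by rw [hs]; simp)
  have hsort : (s0 :: s1 :: t).foldl pvStep (M, M) = (s0, s1) := by
    have e0 : pvStep (M, M) s0 = (s0, M) := by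
      have := hbound s0 hs0
      simp only [pvStep]; split_ifs <;> first | rfl | omega
    have e1 : pvStep (s0, M) s1 = (s0, s1) := by
      have := hbound s1 hs1
      simp only [pvStep]; split_ifs <;> first | rfl | omega
    simp only [List.foldl_cons, e0, e1]
    exact pvScan_noop t s0 s1 h01 hts
  have := List.Perm.foldl_eq (f := pvStep) hperm (M, M)
  rw [hs, hsort] at this
  rw [← hfull, ← this]

-- ===== VERDICT =====
theorem solve_spec : Claim_equal_solve := by
  intro s _
  unfold Spec_solve solve solve_alt
  rw [PySem.Dict.foldl_insert_getD_add_one_eq_counter, PySem.Dict.counter_eq_foldl]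
  set d := s.toList.foldl (fun d c => d.modify c 0 (· + 1)) (PySem.Dict.empty : PySem.Dict Char Int) with hd
  by_cases h : "chokudai".toList.any (fun c => !(d.contains c))
  · rw [if_pos h, if_pos h]
  · rw [if_neg h, if_neg h]
    rcases hv : d.values with _ | ⟨v0, _ | ⟨v1, rest⟩⟩
    · simp [PySem.List.sorted, PySem.List.pyGet?]
    · have h1 : PySem.List.sorted [v0] (fun x => x) false = [v0] := by simp [pysem]
      simp [h1, PySem.List.pyGet?, PySem.List.pyIdx?, PySem.List.slice_from_one]
    · -- sorted has the same length ≥ 2, so it is s0 :: s1 :: t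
      have hlen := PySem.List.length_sorted (v0 :: v1 :: rest) (fun x => x) false
      rcases he : PySem.List.sorted (v0 :: v1 :: rest) (fun x => x) false with _ | ⟨s0, _ | ⟨s1, t⟩⟩
      · rw [he] at hlen; simp at hlen
      · rw [he] at hlen; simp at hlen
      · have hscan := pvScan_eq_sorted_head v0 v1 rest s0 s1 t he
        have hn : (0:Int) ≤ (t.length : Int) + 1 := by positivity
        simp [hscan, hn, PySem.List.pyGet?, PySem.List.pyIdx?, PySem.List.slice_from_one, pvTri]
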